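-- pv_equiv track=rewrite | github.com/nschneid/pysupersensetagger | src/labeledSentence.py | wordShape
-- ===== SOURCE A (Python) =====
-- def wordShape(tkn):
--     '''Word shape feature described by Ciaramita & Altun 2006'''
--     shape = ''
--     prevCharType = -1
--     addedStar = False
--     for curChar in tkn:
--         if curChar>='A' and curChar<='Z':
--             charType = 'X'
--         elif curChar>='a' and curChar<='z':
--             charType = 'x'
--         elif curChar>='0' and curChar<='9':
--             charType = 'd'
--         else:
--             charType = curChar
--
--         if charType==prevCharType:
--             if not addedStar:
--                 shape = ''.join([shape, '*'])
--                 addedStar = True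
--         else:
--             addedStar = False
--             shape = ''.join([shape, charType])
--
--         prevCharType = charType
--
--     return shape
-- ===== SOURCE B (Python) =====
-- def wordShape(tkn):
--     '''Word shape feature described by Ciaramita & Altun 2006'''
--     def ctype(c):
--         if 'A' <= c <= 'Z':
--             return 'X'
--         if 'a' <= c <= 'z':
--             return 'x'
--         if '0' <= c <= '9':
--             return 'd'
--         return c
--
--     out = []
--     i, n = 0, len(tkn)
--     while i < n:
--         t = ctype(tkn[i])
--         j = i + 1
--         while j < n and ctype(tkn[j]) == t:
--             j += 1
--         out.append(t if j - i == 1 else t + '*')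
--         i = j
--     return ''.join(out)
-- ===== Notes on version B (the rewrite author's own statement) =====
-- stated objective: idiomatic
-- what changed: B scans maximal runs of same-type characters (outer loop per run, inner loop to find each run's end) and emits the run's type character, followed by a star when the run is longer than one, instead of A's per-character loop threading prevCharType/addedStar state.
import Mathlib
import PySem

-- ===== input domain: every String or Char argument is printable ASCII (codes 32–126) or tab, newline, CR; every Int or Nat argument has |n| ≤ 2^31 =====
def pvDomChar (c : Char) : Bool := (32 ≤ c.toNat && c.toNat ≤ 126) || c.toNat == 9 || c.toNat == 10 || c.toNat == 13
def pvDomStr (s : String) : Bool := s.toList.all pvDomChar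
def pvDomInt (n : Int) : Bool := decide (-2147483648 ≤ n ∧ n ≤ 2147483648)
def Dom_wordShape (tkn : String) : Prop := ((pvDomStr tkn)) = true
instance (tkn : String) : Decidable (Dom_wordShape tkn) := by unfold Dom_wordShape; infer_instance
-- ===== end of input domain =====

-- B replaces A's per-character loop with prevCharType/addedStar state by a run-at-a-time scan
-- (each maximal same-type run emits its type char plus '*' if longer than 1): more idiomatic, same O(n) cost.


-- ===== PORT A =====
-- charType of one character, exactly A's chained comparisons (else-branch returns the char itself)
def pvCharType (c : Char) : Char :=
  if 'A' ≤ c ∧ c ≤ 'Z' then 'X'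
  else if 'a' ≤ c ∧ c ≤ 'z' then 'x'
  else if '0' ≤ c ∧ c ≤ '9' then 'd'
  else c

-- A's loop body: state = (shape, prevCharType, addedStar); Python's initial prevCharType = -1
-- (an int, never equal to any 1-char string) is modelled as Option none.
def pvAStep (st : List Char × Option Char × Bool) (curChar : Char) : List Char × Option Char × Bool :=
  let charType := pvCharType curChar
  let (shape, prevCharType, addedStar) := st
  if some charType = prevCharType then
    if ¬ addedStar then (shape ++ ['*'], some charType, true)
    else (shape, some charType, addedStar)
  else (shape ++ [charType], some charType, false)

def wordShape (tkn : String) : String :=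
  String.mk (tkn.toList.foldl pvAStep ([], none, false)).1

-- ===== PORT B =====
-- Source B's inner while loop: advance j past characters whose ctype equals t (here: split rest
-- into the run continuation and the remainder).
def pvRun (t : Char) : List Char → List Char × List Char
  | [] => ([], [])
  | c :: rest =>
      if pvCharType c = t then
        let (r, rest') := pvRun t rest
        (c :: r, rest')
      else ([], c :: rest)

theorem pvRun_snd_le (t : Char) (l : List Char) : (pvRun t l).2.length ≤ l.length := by
  induction l with
  | nil => simp [pvRun]
  | cons c rest ih =>
      simp only [pvRun]
      split
      · exact le_trans ih (Nat.le_succ _)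
      · simp

-- Source B's outer while loop: one iteration per maximal run.
def pvBGo : List Char → List Char
  | [] => []
  | c :: rest =>
      let t := pvCharType c
      let p := pvRun t rest
      (if p.1 = [] then [t] else [t, '*']) ++ pvBGo p.2
  termination_by l => l.length
  decreasing_by
    simpa using Nat.lt_succ_of_le (pvRun_snd_le t rest)

def wordShape_alt (tkn : String) : String := String.mk (pvBGo tkn.toList)

-- ===== PRECONDITION & SPEC =====
def Spec_wordShape (tkn : String) (out : String) : Prop := out = wordShape_alt tkn
instance (tkn : String) (out : String) : Decidable (Spec_wordShape tkn out) := by unfold Spec_wordShape; infer_instance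

-- ===== CLAIM (what is proved, stated in full; the proofs are below) =====
def Claim_equal_wordShape : Prop := ∀ (tkn : String), Dom_wordShape tkn → Spec_wordShape tkn (wordShape tkn)

-- ===== LEMMAS AND PROOFS =====

-- the run returned by pvRun consists of chars of type t, and the remainder starts with a different type
theorem pvRun_spec (t : Char) (l : List Char) :
    l = (pvRun t l).1 ++ (pvRun t l).2 ∧
    (∀ c ∈ (pvRun t l).1, pvCharType c = t) ∧
    (∀ c r, (pvRun t l).2 = c :: r → pvCharType c ≠ t) := by
  induction l with
  | nil => simp [pvRun]
  | cons c rest ih =>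
      simp only [pvRun]
      split
      · rename_i h
        refine ⟨by simpa using ih.1, ?_, ih.2.2⟩
        intro d hd
        rcases List.mem_cons.mp hd with rfl | hd
        · exact h
        · exact ih.2.1 d hd
      · rename_i h
        exact ⟨rfl, by simp, fun d r hr => by cases hr; exact h⟩

-- A's loop over a tail of chars all of type t, starting right after the run's head was emitted:
-- with addedStar = false, it appends '*' iff the tail is nonempty.
theorem pvA_run (t : Char) (run : List Char) (h : ∀ c ∈ run, pvCharType c = t)
    (shape : List Char) :
    run.foldl pvAStep (shape, some t, false) =
      (shape ++ (if run = [] then [] else ['*']), some t, !run.isEmpty) := by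
  induction run generalizing shape with
  | nil => simp
  | cons c rest ih =>
      have hc : pvCharType c = t := h c (by simp)
      have hrest : ∀ d ∈ rest, pvCharType d = t := fun d hd => h d (List.mem_cons_of_mem _ hd)
      simp only [List.foldl_cons, pvAStep, hc]
      -- after the first same-type char: star added, addedStar = true
      have starstable : ∀ (l : List Char) (s : List Char), (∀ d ∈ l, pvCharType d = t) →
          l.foldl pvAStep (s, some t, true) = (s, some t, true) := by
        intro l
        induction l with
        | nil => intro s _; simp
        | cons d m ihm =>
            intro s hl
            have hd2 : pvCharType d = t := hl d (by simp)
            simp only [List.foldl_cons, pvAStep, hd2]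
            simpa using ihm s (fun e he => hl e (List.mem_cons_of_mem _ he))
      simp [starstable rest (shape ++ ['*']) hrest]

-- main invariant: from any state whose prev differs from the type of the next char
-- (in particular the initial none), A's fold appends exactly pvBGo of the remaining chars.
theorem pvA_eq_B_aux (n : Nat) : ∀ (l : List Char), l.length ≤ n →
    ∀ (shape : List Char) (prev : Option Char) (star : Bool),
      (∀ c r, l = c :: r → prev ≠ some (pvCharType c)) →
      (l.foldl pvAStep (shape, prev, star)).1 = shape ++ pvBGo l := by
  induction n with
  | zero =>
      intro l hl shape prev star _
      rw [List.length_eq_zero_iff.mp (Nat.le_zero.mp hl)]; simp [pvBGo]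
  | succ n IH =>
  intro l hn shape prev star hprev
  cases l with
  | nil => simp [pvBGo]
  | cons c rest =>
      set t := pvCharType c with ht
      obtain ⟨hsplit, hrun, hrest⟩ := pvRun_spec t rest
      -- first char: new type, appended
      have step1 : pvAStep (shape, prev, star) c = (shape ++ [t], some t, false) := by
        have hne : ¬ (some t = prev) := fun h => hprev c rest rfl h.symm
        simp only [pvAStep]
        rw [if_neg hne]
      conv_lhs => rw [List.foldl_cons, step1, hsplit, List.foldl_append]
      rw [pvA_run t (pvRun t rest).1 hrun (shape ++ [t])]
      have hlen : (pvRun t rest).2.length ≤ n := by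
        have := pvRun_snd_le t rest; simp at hn; omega
      rw [IH (pvRun t rest).2 hlen _ (some t) _
        (fun d r hr h2 => hrest d r hr (Option.some.injEq _ _ ▸ h2.symm ▸ rfl))]
      conv_rhs => rw [pvBGo]
      split <;> (simp; exact ⟨ht, rfl⟩)

-- ===== VERDICT (by name: the statement is the Claim_ definition above) =====
theorem wordShape_spec : Claim_equal_wordShape := by
  intro tkn _
  unfold Spec_wordShape wordShape wordShape_alt
  rw [pvA_eq_B_aux tkn.toList.length tkn.toList (le_refl _) [] none false (by intro c r _ h; cases h)]
  simp
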